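-- pv_equiv track=rewrite | github.com/abdulmaajidaga/ANN-PSO-Hybrid-F21BC | ANN/architecture_search.py | generate_architectures
-- ===== SOURCE A (Python) =====
-- def generate_architectures(max_layers=4, min_neurons=4, max_neurons=32):
--     """
--     Generate different layer architectures to test.
--
--     Args:
--         max_layers: Maximum number of hidden layers (1-4)
--         min_neurons: Minimum neurons per hidden layer
--         max_neurons: Maximum neurons per hidden layer
--
--     Returns:
--         List of architecture configurations [8, h1, h2, ..., 1]
--     """
--     architectures = []
--     neuron_options = [4, 8, 12, 16, 20, 24, 32]
--     neuron_options = [n for n in neuron_options if min_neurons <= n <= max_neurons]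
--
--     # 1 hidden layer: [8, n1, 1]
--     for n1 in neuron_options:
--         architectures.append([8, n1, 1])
--
--     if max_layers >= 2:
--         # 2 hidden layers: [8, n1, n2, 1]
--         for n1 in neuron_options:
--             for n2 in neuron_options:
--                 if n2 <= n1:  # Generally decrease size
--                     architectures.append([8, n1, n2, 1])
--
--     if max_layers >= 3:
--         # 3 hidden layers: [8, n1, n2, n3, 1]
--         for n1 in [16, 20, 24, 32]:
--             for n2 in [8, 12, 16]:
--                 for n3 in [4, 8]:
--                     if n2 <= n1 and n3 <= n2:
--                         architectures.append([8, n1, n2, n3, 1])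
--
--     if max_layers >= 4:
--         # 4 hidden layers: [8, n1, n2, n3, n4, 1]
--         for n1 in [24, 32]:
--             for n2 in [16, 20]:
--                 for n3 in [12, 16]:
--                     for n4 in [8, 12]:
--                         if n2 <= n1 and n3 <= n2 and n4 <= n3:
--                             architectures.append([8, n1, n2, n3, n4, 1])
--
--     return architectures
-- ===== SOURCE B (Python) =====
-- def generate_architectures(max_layers=4, min_neurons=4, max_neurons=32):
--     """Same enumeration via one recursive per-position traversal instead of
--     four hand-written nested-loop blocks."""
--     opts = [n for n in [4, 8, 12, 16, 20, 24, 32] if min_neurons <= n <= max_neurons]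
--
--     def enumerate_archs(options_lists, prev=None):
--         if not options_lists:
--             return [[1]]
--         results = []
--         for v in options_lists[0]:
--             if prev is None or v <= prev:
--                 for tail in enumerate_archs(options_lists[1:], v):
--                     results.append([v] + tail)
--         return results
--
--     blocks = [[opts]]
--     if max_layers >= 2:
--         blocks.append([opts, opts])
--     if max_layers >= 3:
--         blocks.append([[16, 20, 24, 32], [8, 12, 16], [4, 8]])
--     if max_layers >= 4:
--         blocks.append([[24, 32], [16, 20], [12, 16], [8, 12]])
--
--     architectures = []
--     for block in blocks:
--         for arch in enumerate_archs(block):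
--             architectures.append([8] + arch)
--     return architectures
-- ===== Notes on version B (the rewrite author's own statement) =====
-- stated objective: simpler
-- what changed: Replaces the four hand-written nested-loop blocks with one recursive enumerator over per-position option lists (filtering each value against the previous layer), driven by a list of blocks.
import Mathlib
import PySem

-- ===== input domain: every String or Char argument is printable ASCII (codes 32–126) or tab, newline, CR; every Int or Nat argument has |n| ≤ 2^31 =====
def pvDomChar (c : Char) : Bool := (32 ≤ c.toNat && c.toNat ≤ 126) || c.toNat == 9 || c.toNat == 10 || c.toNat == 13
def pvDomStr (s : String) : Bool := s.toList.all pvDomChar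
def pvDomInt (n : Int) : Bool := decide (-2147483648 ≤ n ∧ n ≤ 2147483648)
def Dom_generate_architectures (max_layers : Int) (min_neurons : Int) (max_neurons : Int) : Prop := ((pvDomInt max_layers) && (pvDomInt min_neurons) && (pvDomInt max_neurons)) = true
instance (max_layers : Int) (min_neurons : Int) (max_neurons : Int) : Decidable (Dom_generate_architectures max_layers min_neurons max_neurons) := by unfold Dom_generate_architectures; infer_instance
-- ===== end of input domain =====

-- B replaces A's four hand-written nested-loop blocks with one recursive per-position
-- enumerator driven by a list of option-list blocks (simpler decomposition, same cost).

-- ===== PORT A =====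
def generate_architectures (max_layers : Int) (min_neurons : Int) (max_neurons : Int) : List (List Int) :=
  let neuron_options := ([4, 8, 12, 16, 20, 24, 32] : List Int).filter
    (fun n => decide (min_neurons ≤ n) && decide (n ≤ max_neurons))
  let a1 := neuron_options.foldl (fun acc n1 => acc ++ [[8, n1, 1]]) []
  let a2 :=
    if max_layers ≥ 2 then
      neuron_options.foldl (fun acc n1 =>
        neuron_options.foldl (fun acc n2 =>
          if n2 ≤ n1 then acc ++ [[8, n1, n2, 1]] else acc) acc) a1
    else a1
  let a3 :=
    if max_layers ≥ 3 then
      ([16, 20, 24, 32] : List Int).foldl (fun acc n1 =>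
        ([8, 12, 16] : List Int).foldl (fun acc n2 =>
          ([4, 8] : List Int).foldl (fun acc n3 =>
            if n2 ≤ n1 ∧ n3 ≤ n2 then acc ++ [[8, n1, n2, n3, 1]] else acc) acc) acc) a2
    else a2
  if max_layers ≥ 4 then
    ([24, 32] : List Int).foldl (fun acc n1 =>
      ([16, 20] : List Int).foldl (fun acc n2 =>
        ([12, 16] : List Int).foldl (fun acc n3 =>
          ([8, 12] : List Int).foldl (fun acc n4 =>
            if n2 ≤ n1 ∧ n3 ≤ n2 ∧ n4 ≤ n3 then acc ++ [[8, n1, n2, n3, n4, 1]] else acc)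
            acc) acc) acc) a3
  else a3

-- ===== PORT B =====
-- recursive helper: enumerate the tails, filtering each value against the previous one
def enumArchs : List (List Int) → Option Int → List (List Int)
  | [], _ => [[1]]
  | o :: rest, prev =>
    o.foldl (fun results v =>
      if prev.all (fun p => v ≤ p) then
        results ++ (enumArchs rest (some v)).map (fun tail => v :: tail)
      else results) []

def generate_architectures_alt (max_layers : Int) (min_neurons : Int) (max_neurons : Int) : List (List Int) :=
  let opts := ([4, 8, 12, 16, 20, 24, 32] : List Int).filter
    (fun n => decide (min_neurons ≤ n) && decide (n ≤ max_neurons))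
  let blocks : List (List (List Int)) :=
    [[opts]]
    ++ (if max_layers ≥ 2 then [[opts, opts]] else [])
    ++ (if max_layers ≥ 3 then [[[16, 20, 24, 32], [8, 12, 16], [4, 8]]] else [])
    ++ (if max_layers ≥ 4 then [[[24, 32], [16, 20], [12, 16], [8, 12]]] else [])
  blocks.foldl (fun acc block =>
    (enumArchs block none).foldl (fun acc arch => acc ++ [8 :: arch]) acc) []

-- ===== PRECONDITION & SPEC =====
def Spec_generate_architectures (max_layers : Int) (min_neurons : Int) (max_neurons : Int) (out : List (List Int)) : Prop := out = generate_architectures_alt max_layers min_neurons max_neurons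
instance (max_layers : Int) (min_neurons : Int) (max_neurons : Int) (out : List (List Int)) : Decidable (Spec_generate_architectures max_layers min_neurons max_neurons out) := by unfold Spec_generate_architectures; infer_instance

-- ===== CLAIM (what is proved, stated in full; the proofs are below) =====
def Claim_equal_generate_architectures : Prop := ∀ (max_layers : Int) (min_neurons : Int) (max_neurons : Int), Dom_generate_architectures max_layers min_neurons max_neurons → Spec_generate_architectures max_layers min_neurons max_neurons (generate_architectures max_layers min_neurons max_neurons)

-- ===== LEMMAS AND PROOFS =====

-- ===== VERDICT (by name: the statement is the Claim_ definition above) =====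
lemma foldl_append_guard (l : List Int) (p : Int → Bool) (g : Int → List (List Int))
    (acc : List (List Int)) :
    l.foldl (fun acc x => if p x then acc ++ g x else acc) acc
      = acc ++ l.flatMap (fun x => if p x then g x else []) := by
  induction l generalizing acc with
  | nil => simp
  | cons h t ih => by_cases hp : p h <;> simp [hp, ih]

theorem generate_architectures_spec : Claim_equal_generate_architectures := by
  intro ml mn mx _
  unfold Spec_generate_architectures generate_architectures generate_architectures_alt
  generalize (([4, 8, 12, 16, 20, 24, 32] : List Int).filter
    (fun n => decide (mn ≤ n) && decide (n ≤ mx))) = l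
  split_ifs with h2 h3 h4 <;>
  simp only [enumArchs, Option.all, List.map_cons, List.map_nil, if_true,
    PySem.List.foldl_append_singleton_eq_map, foldl_append_guard,
    PySem.List.foldl_append_ite, PySem.List.foldl_append_eq_flatMap,
    List.map_flatMap, List.map_map,
    List.nil_append, List.append_nil, List.append_assoc,
    List.flatMap_cons, List.flatMap_nil, List.cons_append] <;>
  simp [Function.comp_def, List.filter]
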